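-- pv_equiv track=rewrite | github.com/zmxncbv123098/schoolLessons | Lessons/sql/Functions.py | IdToShortUrl
-- ===== SOURCE A (Python) =====
-- def IdToShortUrl(Id):
--
--     def reverse(s):
--         new_s = ''
--         for i in range(1, (len(s) + 1)):
--             new_s += s[len(s) - i]
--         return new_s
--
--     mapp = 'abcdefghijklmnopqrstuvwxyzABCDEFGHIJKLMNOPQRSTUVWXYZ0123456789'
--     ShortUrl = ''
--
--     while int(Id) != 0:
--         ShortUrl += mapp[Id % 62]
--         Id = int(Id / 62)
--
--     return reverse(ShortUrl)
-- ===== SOURCE B (Python) =====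
-- def IdToShortUrl(Id):
--     mapp = 'abcdefghijklmnopqrstuvwxyzABCDEFGHIJKLMNOPQRSTUVWXYZ0123456789'
--     if int(Id) == 0:
--         return ''
--     return IdToShortUrl(int(Id / 62)) + mapp[Id % 62]
-- ===== Notes on version B (the rewrite author's own statement) =====
-- stated objective: simpler
-- what changed: Replaces the accumulate-then-reverse while loop (with a hand-written index-by-index string reverse helper) by a direct recursion on int(Id/62) that emits digits most-significant first, eliminating the reverse helper entirely.
import Mathlib
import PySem

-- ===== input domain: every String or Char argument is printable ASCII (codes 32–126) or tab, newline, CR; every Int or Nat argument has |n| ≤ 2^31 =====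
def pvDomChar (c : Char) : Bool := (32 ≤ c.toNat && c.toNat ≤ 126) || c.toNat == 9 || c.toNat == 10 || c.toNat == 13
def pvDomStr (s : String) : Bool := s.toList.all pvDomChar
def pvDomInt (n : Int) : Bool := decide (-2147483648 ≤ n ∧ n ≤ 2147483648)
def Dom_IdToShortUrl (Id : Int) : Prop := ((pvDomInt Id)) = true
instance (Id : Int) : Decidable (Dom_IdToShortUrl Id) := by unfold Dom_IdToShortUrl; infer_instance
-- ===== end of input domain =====

-- B replaces A's accumulate-then-reverse while loop (with its hand-written reverse helper)
-- by a direct recursion on the truncated quotient, emitting digits most-significant first.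
-- `int(Id / 62)` (float division then truncation) is ported as Int.tdiv (truncation toward
-- zero), which is exact on the domain |Id| ≤ 2^31 (the float rounding error there is far
-- below 1/62, so truncation of the float equals truncation of the exact quotient).

-- ===== PORT A =====
def pvMappA : List Char := "abcdefghijklmnopqrstuvwxyzABCDEFGHIJKLMNOPQRSTUVWXYZ0123456789".toList

-- reverse helper: new_s += s[len(s) - i] for i in range(1, len(s)+1); the index is always
-- in range, so the `.getD []` branch (Python's IndexError) is never taken.
def pvReverseA (s : List Char) : List Char :=
  (PySem.List.pyRange 1 ((s.length : Int) + 1) 1).foldl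
    (fun new_s i =>
      new_s ++ ((PySem.List.pyGet? s ((s.length : Int) - i)).map (fun c => [c])).getD [])
    []

-- the while loop: ShortUrl += mapp[Id % 62]; Id = int(Id / 62)
def pvLoopA (Id : Int) (ShortUrl : List Char) : List Char :=
  if _h : Id ≠ 0 then
    pvLoopA (Id.tdiv 62)
      (ShortUrl ++ ((PySem.List.pyGet? pvMappA (PySem.Int.mod Id 62)).map (fun c => [c])).getD [])
  else ShortUrl
termination_by Id.natAbs
decreasing_by
  have : (Id.tdiv 62).natAbs = Id.natAbs / 62 := Int.natAbs_tdiv Id 62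
  omega

def IdToShortUrl (Id : Int) : String := String.ofList (pvReverseA (pvLoopA Id []))

-- ===== PORT B =====
def pvMappB : List Char := "abcdefghijklmnopqrstuvwxyzABCDEFGHIJKLMNOPQRSTUVWXYZ0123456789".toList

-- recursion: if int(Id) == 0: return '' ; return IdToShortUrl(int(Id / 62)) + mapp[Id % 62]
def pvAltChars (Id : Int) : List Char :=
  if _h : Id = 0 then []
  else
    pvAltChars (Id.tdiv 62) ++
      ((PySem.List.pyGet? pvMappB (PySem.Int.mod Id 62)).map (fun c => [c])).getD []
termination_by Id.natAbs
decreasing_by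
  have : (Id.tdiv 62).natAbs = Id.natAbs / 62 := Int.natAbs_tdiv Id 62
  omega

def IdToShortUrl_alt (Id : Int) : String := String.ofList (pvAltChars Id)

-- ===== PRECONDITION & SPEC =====
def Spec_IdToShortUrl (Id : Int) (out : String) : Prop := out = IdToShortUrl_alt Id
instance (Id : Int) (out : String) : Decidable (Spec_IdToShortUrl Id out) := by unfold Spec_IdToShortUrl; infer_instance

-- ===== CLAIM (what is proved, stated in full; the proofs are below) =====
def Claim_equal_IdToShortUrl : Prop := ∀ (Id : Int), Dom_IdToShortUrl Id → Spec_IdToShortUrl Id (IdToShortUrl Id)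

-- ===== LEMMAS AND PROOFS =====

theorem pvMapp_eq : pvMappB = pvMappA := rfl

theorem pvMappA_length : pvMappA.length = 62 := by decide

-- the digit appended at each step is a single character
theorem pvDig_singleton (Id : Int) :
    ((PySem.List.pyGet? pvMappA (PySem.Int.mod Id 62)).map (fun c => [c])).getD []
      = [pvMappA[(PySem.Int.mod Id 62).toNat]'(by
          have h := PySem.Int.mod_eq_emod_of_pos (a := Id) (b := 62) (by norm_num)
          rw [pvMappA_length, h]; omega)] := by
  have h := PySem.Int.mod_eq_emod_of_pos (a := Id) (b := 62) (by norm_num)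
  have h1 : 0 ≤ Id % 62 := Int.emod_nonneg _ (by norm_num)
  have h2 : Id % 62 < 62 := Int.emod_lt_of_pos _ (by norm_num)
  rw [PySem.List.pyGet?_eq_some_getElem pvMappA (by omega) (by rw [pvMappA_length]; omega)]
  simp

theorem pvLoopA_eq (Id : Int) (acc : List Char) :
    pvLoopA Id acc = acc ++ (pvAltChars Id).reverse := by
  induction Id, acc using pvLoopA.induct with
  | case1 Id acc h ih =>
      rw [pvLoopA, pvAltChars, dif_pos h, dif_neg h, ih, pvMapp_eq, List.reverse_append,
        pvDig_singleton Id]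
      simp [List.append_assoc]
  | case2 Id acc h =>
      rw [pvLoopA, pvAltChars, dif_neg h, dif_pos (by omega : Id = 0)]
      simp

theorem pvFoldl_app {α β : Type} (l : List α) (g : α → List β) (acc : List β) :
    l.foldl (fun a x => a ++ g x) acc = acc ++ l.flatMap g := by
  induction l generalizing acc with
  | nil => simp
  | cons x t ih => simp [ih, List.append_assoc]

theorem pvFlatMap_singleton {α β : Type} (l : List α) (g : α → List β) (f : α → β)
    (h : ∀ x ∈ l, g x = [f x]) : l.flatMap g = l.map f := by
  induction l with
  | nil => simp
  | cons x t ih => simp [h x (by simp), ih (fun y hy => h y (by simp [hy]))]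

theorem pvReverseA_eq (s : List Char) : pvReverseA s = s.reverse := by
  unfold pvReverseA
  rw [pvFoldl_app, PySem.List.pyRange_one, List.flatMap_map]
  have hn : ((s.length : Int) + 1 - 1).toNat = s.length := by omega
  rw [hn]
  rw [pvFlatMap_singleton _ _ (fun k => s.getD (s.length - 1 - k) 'a') ?_]
  · apply List.ext_getElem
    · simp
    · intro i _h1 h2
      simp only [List.nil_append, List.getElem_map, List.getElem_range, List.getElem_reverse]
      have hlt : s.length - 1 - i < s.length := by simp at h2; omega
      rw [List.getD_eq_getElem s 'a' hlt]
  · intro k hk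
    simp only [List.mem_range] at hk
    rw [PySem.List.pyGet?_eq_some_getElem s (by omega) (by omega)]
    have hidx : ((s.length : Int) - (1 + (k : Int))).toNat = s.length - 1 - k := by omega
    simp only [Option.map_some, Option.getD_some, hidx]
    rw [List.getD_eq_getElem s 'a' (by omega)]

-- ===== VERDICT (by name: the statement is the Claim_ definition above) =====
theorem IdToShortUrl_spec : Claim_equal_IdToShortUrl := by
  intro Id _
  unfold Spec_IdToShortUrl IdToShortUrl IdToShortUrl_alt
  rw [pvLoopA_eq, pvReverseA_eq]
  simp
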